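-- pv_equiv track=rewrite | github.com/CombinEC-R/Pixel-Perfect-Aligner | pixel_perfect_aligner/pixel_perfect_aligner.py | _make_bleed_offsets
-- ===== SOURCE A (Python) =====
-- def _make_bleed_offsets(radius):
-- 	# Sorted offsets by distance, excluding (0,0).
-- 	offs = []
-- 	r = int(max(1, radius))
-- 	for oy in range(-r, r + 1):
-- 		for ox in range(-r, r + 1):
-- 			if ox == 0 and oy == 0:
-- 				continue
-- 			d2 = (ox * ox) + (oy * oy)
-- 			offs.append((d2, ox, oy))
-- 	offs.sort(key=lambda t: t[0])
-- 	return [(ox, oy) for _d2, ox, oy in offs]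
-- ===== SOURCE B (Python) =====
-- def _make_bleed_offsets(radius):
-- 	# Bucket sort by squared distance: d2 is an integer in [1, 2*r*r], so
-- 	# appending each offset to bucket d2 in scan order and concatenating the
-- 	# buckets yields the same stable distance-sorted order without comparisons.
-- 	r = int(max(1, radius))
-- 	buckets = [[] for _ in range(2 * r * r + 1)]
-- 	for oy in range(-r, r + 1):
-- 		for ox in range(-r, r + 1):
-- 			if ox == 0 and oy == 0:
-- 				continue
-- 			buckets[ox * ox + oy * oy].append((ox, oy))
-- 	return [p for b in buckets for p in b]
-- ===== Notes on version B (the rewrite author's own statement) =====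
-- stated objective: alternative
-- what changed: replaces the comparison sort of all (2r+1)^2-1 offsets by a counting/bucket sort indexed by the integer squared distance d2 in [1,2r^2], appending in scan order so stable ties are preserved
import Mathlib
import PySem

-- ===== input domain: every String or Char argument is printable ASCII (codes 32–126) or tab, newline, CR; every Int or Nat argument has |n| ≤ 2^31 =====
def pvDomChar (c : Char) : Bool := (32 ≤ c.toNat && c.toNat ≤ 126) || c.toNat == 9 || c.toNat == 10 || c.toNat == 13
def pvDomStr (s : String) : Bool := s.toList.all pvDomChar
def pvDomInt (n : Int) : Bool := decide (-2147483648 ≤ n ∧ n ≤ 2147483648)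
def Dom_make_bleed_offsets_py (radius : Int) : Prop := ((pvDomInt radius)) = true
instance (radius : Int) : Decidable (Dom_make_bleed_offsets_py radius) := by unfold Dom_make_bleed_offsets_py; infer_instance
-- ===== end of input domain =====

-- B replaces A's comparison sort by a bucket sort over the integer squared distance (alternative algorithm, same result).

-- ===== PORT A =====
def make_bleed_offsets_py (radius : Int) : List (Int × Int) :=
  let r : Int := max 1 radius
  let offs : List (Int × Int × Int) :=
    (PySem.List.pyRange (-r) (r+1) 1).foldl (fun offs oy =>
      (PySem.List.pyRange (-r) (r+1) 1).foldl (fun offs ox =>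
        if ox = 0 ∧ oy = 0 then offs
        else offs ++ [(ox*ox + oy*oy, ox, oy)]) offs) []
  (PySem.List.sorted offs (fun t => t.1)).map (fun t => (t.2.1, t.2.2))

-- ===== PORT B =====
-- index d2 = ox*ox+oy*oy is always ≥ 0 and < len(buckets), so pyGetD/pySetD are exact here
def make_bleed_offsets_py_alt (radius : Int) : List (Int × Int) :=
  let r : Int := max 1 radius
  let buckets0 : List (List (Int × Int)) := (PySem.List.pyRange 0 (2*r*r+1) 1).map (fun _ => [])
  let buckets : List (List (Int × Int)) :=
    (PySem.List.pyRange (-r) (r+1) 1).foldl (fun bs oy =>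
      (PySem.List.pyRange (-r) (r+1) 1).foldl (fun bs ox =>
        if ox = 0 ∧ oy = 0 then bs
        else
          let d2 := ox*ox + oy*oy
          PySem.List.pySetD bs d2 (PySem.List.pyGetD bs d2 [] ++ [(ox, oy)])) bs) buckets0
  buckets.foldl (fun out b => out ++ b) []

-- ===== PRECONDITION & SPEC =====
def Spec_make_bleed_offsets_py (radius : Int) (out : List (Int × Int)) : Prop := out = make_bleed_offsets_py_alt radius
instance (radius : Int) (out : List (Int × Int)) : Decidable (Spec_make_bleed_offsets_py radius out) := by unfold Spec_make_bleed_offsets_py; infer_instance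

-- ===== CLAIM (what is proved, stated in full; the proofs are below) =====
def Claim_equal_make_bleed_offsets_py : Prop := ∀ (radius : Int), Dom_make_bleed_offsets_py radius → Spec_make_bleed_offsets_py radius (make_bleed_offsets_py radius)

-- ===== LEMMAS AND PROOFS =====

-- the triple list A appends, in scan order
def pvScan (r : Int) : List (Int × Int × Int) :=
  (PySem.List.pyRange (-r) (r+1) 1).flatMap (fun oy =>
    (PySem.List.pyRange (-r) (r+1) 1).flatMap (fun ox =>
      if ox = 0 ∧ oy = 0 then [] else [(ox*ox + oy*oy, ox, oy)]))

-- the bucket keys 0, 1, …, N-1 as integers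
def pvKs (N : Nat) : List Int := (List.range N).map (fun k => Int.ofNat k)

-- bucket k (0 ≤ k < N) holds the projected elements of l with first component k, in order
def pvBuckets (N : Nat) (l : List (Int × Int × Int)) : List (List (Int × Int)) :=
  (List.range N).map (fun k => (l.filter (fun t => decide (t.1 = Int.ofNat k))).map (fun t => (t.2.1, t.2.2)))

theorem pvInsertBy_append_not {α : Type} (before : α → α → Bool) (x : α) (as bs : List α)
    (h : ∀ a ∈ as, before x a = false) :
    PySem.List.insertBy before x (as ++ bs) = as ++ PySem.List.insertBy before x bs := by
  induction as with
  | nil => simp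
  | cons a as ih =>
    simp only [List.cons_append, PySem.List.insertBy, h a (by simp)]
    simp only [Bool.false_eq_true, if_false, List.cons.injEq, true_and]
    exact ih (fun a ha => h a (by simp [ha]))

theorem pvInsertBy_all_before {α : Type} (before : α → α → Bool) (x : α) (bs : List α)
    (h : ∀ b ∈ bs, before x b = true) :
    PySem.List.insertBy before x bs = x :: bs := by
  cases bs with
  | nil => rfl
  | cons b bs => simp [PySem.List.insertBy, h b (by simp)]

theorem pvMem_flatMap_filter {α : Type} (key : α → Int) (ks : List Int) (l : List α) (a : α)
    (ha : a ∈ ks.flatMap (fun k => l.filter (fun x => decide (key x = k)))) :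
    key a ∈ ks := by
  rcases List.mem_flatMap.mp ha with ⟨k, hk, hfa⟩
  have := List.of_mem_filter hfa
  simp only [decide_eq_true_eq] at this
  simpa [this] using hk

theorem pvInsertBy_buckets {α : Type} (key : α → Int) (ks : List Int) (x : α) (l : List α)
    (hks : ks.Pairwise (· < ·)) (hx : key x ∈ ks) :
    PySem.List.insertBy (fun a b => decide (key a < key b)) x
      (ks.flatMap (fun k => l.filter (fun a => decide (key a = k))))
    = ks.flatMap (fun k => (l ++ [x]).filter (fun a => decide (key a = k))) := by
  induction ks with
  | nil => simp at hx
  | cons k ks ih =>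
    have hklt : ∀ k' ∈ ks, k < k' := by
      intro k' hk'; exact (List.pairwise_cons.mp hks).1 k' hk'
    have hks' : ks.Pairwise (· < ·) := (List.pairwise_cons.mp hks).2
    simp only [List.flatMap_cons]
    by_cases hxk : key x = k
    · -- x lands in the head bucket, appended at its end
      have h1 : ∀ a ∈ l.filter (fun a => decide (key a = k)), (decide (key x < key a)) = false := by
        intro a ha
        have := List.of_mem_filter ha
        simp only [decide_eq_true_eq] at this
        simp [this, hxk]
      have h2 : ∀ a ∈ ks.flatMap (fun k => l.filter (fun a => decide (key a = k))),
          (decide (key x < key a)) = true := by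
        intro a ha
        have hmem := pvMem_flatMap_filter key ks l a ha
        simp [hxk, hklt _ hmem]
      have htail : ∀ k' ∈ ks, ((l ++ [x]).filter (fun a => decide (key a = k')))
          = l.filter (fun a => decide (key a = k')) := by
        intro k' hk'
        have h' : (decide (key x = k')) = false := by
          have := hklt k' hk'; simp [hxk]; omega
        simp [List.filter_append, h']
      have hfm : ks.flatMap (fun k' => (l ++ [x]).filter (fun a => decide (key a = k')))
          = ks.flatMap (fun k' => l.filter (fun a => decide (key a = k'))) :=
        List.flatMap_congr htail
      rw [pvInsertBy_append_not _ _ _ _ h1, pvInsertBy_all_before _ _ _ h2, hfm]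
      simp [List.filter_append, hxk]
    · -- x belongs to a later bucket
      have hx' : key x ∈ ks := by
        rcases (List.mem_cons.mp hx) with h | h
        · exact absurd h hxk
        · exact h
      have h1 : ∀ a ∈ l.filter (fun a => decide (key a = k)), (decide (key x < key a)) = false := by
        intro a ha
        have := List.of_mem_filter ha
        simp only [decide_eq_true_eq] at this
        have := hklt _ hx'
        simp [this]; omega
      rw [pvInsertBy_append_not _ _ _ _ h1, ih hks' hx']
      have hhead : ((l ++ [x]).filter (fun a => decide (key a = k)))
          = l.filter (fun a => decide (key a = k)) := by
        simp [List.filter_append, hxk]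
      rw [hhead]

theorem pvSorted_eq_buckets {α : Type} (key : α → Int) (ks : List Int) (l : List α)
    (hks : ks.Pairwise (· < ·)) (hl : ∀ a ∈ l, key a ∈ ks) :
    PySem.List.sorted l key = ks.flatMap (fun k => l.filter (fun a => decide (key a = k))) := by
  rw [PySem.List.sorted_eq_foldl_insertBy]
  induction l using List.reverseRecOn with
  | nil => simp
  | append_singleton l x ih =>
    rw [List.foldl_append]
    simp only [List.foldl_cons, List.foldl_nil]
    rw [ih (fun a ha => hl a (by simp [ha]))]
    exact pvInsertBy_buckets key ks x l hks (hl x (by simp))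

-- every triple of the scan has 0 ≤ d2 < 2r²+1
theorem pvScan_key_bound (r : Int) (t : Int × Int × Int) (ht : t ∈ pvScan r) :
    0 ≤ t.1 ∧ t.1 < 2*r*r + 1 := by
  rcases List.mem_flatMap.mp ht with ⟨oy, hoy, ht2⟩
  rcases List.mem_flatMap.mp ht2 with ⟨ox, hox, ht3⟩
  have hoy' := (PySem.List.mem_pyRange_one).mp hoy
  have hox' := (PySem.List.mem_pyRange_one).mp hox
  by_cases h0 : ox = 0 ∧ oy = 0
  · simp [h0] at ht3
  · simp only [h0, if_false, List.mem_singleton] at ht3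
    subst ht3
    constructor
    · nlinarith [mul_self_nonneg ox, mul_self_nonneg oy]
    · have h1 : ox*ox ≤ r*r := by nlinarith [hox'.1, hox'.2]
      have h2 : oy*oy ≤ r*r := by nlinarith [hoy'.1, hoy'.2]
      linarith

theorem pvOffs_eq_scan (r : Int) :
    (PySem.List.pyRange (-r) (r+1) 1).foldl (fun offs oy =>
      (PySem.List.pyRange (-r) (r+1) 1).foldl (fun offs ox =>
        if ox = 0 ∧ oy = 0 then offs
        else offs ++ [(ox*ox + oy*oy, ox, oy)]) offs) ([] : List (Int × Int × Int))
    = pvScan r := by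
  unfold pvScan
  rw [PySem.List.foldl_congr_mem _ _
    (fun offs oy => offs ++ (PySem.List.pyRange (-r) (r+1) 1).flatMap
      (fun ox => if ox = 0 ∧ oy = 0 then [] else [(ox*ox + oy*oy, ox, oy)])) _
    (by
      intro acc oy _
      rw [PySem.List.foldl_congr_mem _ _
        (fun offs ox => offs ++ (if ox = 0 ∧ oy = 0 then [] else [(ox*ox + oy*oy, ox, oy)])) _
        (by intro acc' ox _; by_cases h : ox = 0 ∧ oy = 0 <;> simp [h])]
      exact PySem.List.foldl_append_eq_flatMap _ _ _)]
  rw [PySem.List.foldl_append_eq_flatMap]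
  simp

-- one bucket-append step, as an operation on pvBuckets
theorem pvBuckets_step (N : Nat) (l : List (Int × Int × Int)) (t : Int × Int × Int)
    (h0 : 0 ≤ t.1) (hN : t.1 < (N:Int)) :
    PySem.List.pySetD (pvBuckets N l) t.1
      (PySem.List.pyGetD (pvBuckets N l) t.1 [] ++ [(t.2.1, t.2.2)])
    = pvBuckets N (l ++ [t]) := by
  have hlen : (pvBuckets N l).length = N := by simp [pvBuckets]
  have hnat : t.1.toNat < N := by omega
  have hcast : Int.ofNat t.1.toNat = t.1 := by simp; omega
  have hget : PySem.List.pyGetD (pvBuckets N l) t.1 []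
      = (l.filter (fun a => decide (a.1 = t.1))).map (fun a => (a.2.1, a.2.2)) := by
    rw [PySem.List.pyGetD_eq_getElem _ _ h0 (by rw [hlen]; exact_mod_cast hN)]
    unfold pvBuckets
    rw [List.getElem_map, List.getElem_range, hcast]
  rw [PySem.List.pySetD_of_nonneg _ _ h0, hget]
  apply List.ext_getElem
  · simp [pvBuckets]
  · intro k hk hk'
    rw [List.getElem_set]
    unfold pvBuckets
    simp only [List.getElem_map, List.getElem_range]
    by_cases hkt : t.1.toNat = k
    · subst hkt
      rw [if_pos rfl, hcast, List.filter_append, List.map_append]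
      simp
    · rw [if_neg hkt, List.filter_append]
      have hne : ¬ t.1 = (k:Int) := by omega
      simp [hne]

-- the whole bucket fill, over any event list with in-range keys
theorem pvBuckets_fold (N : Nat) (es : List (Int × Int × Int))
    (hes : ∀ t ∈ es, 0 ≤ t.1 ∧ t.1 < (N:Int)) :
    es.foldl (fun bs t =>
        PySem.List.pySetD bs t.1 (PySem.List.pyGetD bs t.1 [] ++ [(t.2.1, t.2.2)]))
      (pvBuckets N [])
    = pvBuckets N es := by
  induction es using List.reverseRecOn with
  | nil => rfl
  | append_singleton es t ih =>
    rw [List.foldl_append]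
    simp only [List.foldl_cons, List.foldl_nil]
    rw [ih (fun a ha => hes a (by simp [ha]))]
    exact pvBuckets_step N es t (hes t (by simp)).1 (hes t (by simp)).2

theorem pvBucketsFill_eq (r : Int) (hr : 1 ≤ r) :
    (PySem.List.pyRange (-r) (r+1) 1).foldl (fun bs oy =>
      (PySem.List.pyRange (-r) (r+1) 1).foldl (fun bs ox =>
        if ox = 0 ∧ oy = 0 then bs
        else
          let d2 := ox*ox + oy*oy
          PySem.List.pySetD bs d2 (PySem.List.pyGetD bs d2 [] ++ [(ox, oy)])) bs)
      ((PySem.List.pyRange 0 (2*r*r+1) 1).map (fun _ => []))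
    = pvBuckets ((2*r*r+1).toNat) (pvScan r) := by
  have hN : (0:Int) ≤ 2*r*r+1 := by positivity
  have hinit : (PySem.List.pyRange 0 (2*r*r+1) 1).map (fun _ => ([] : List (Int × Int)))
      = pvBuckets ((2*r*r+1).toNat) [] := by
    simp [pvBuckets, PySem.List.pyRange_one, List.map_map, Function.comp_def]
  rw [hinit]
  have hstep : ∀ (bs0 : List (List (Int × Int))),
      (PySem.List.pyRange (-r) (r+1) 1).foldl (fun bs oy =>
        (PySem.List.pyRange (-r) (r+1) 1).foldl (fun bs ox =>
          if ox = 0 ∧ oy = 0 then bs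
          else
            let d2 := ox*ox + oy*oy
            PySem.List.pySetD bs d2 (PySem.List.pyGetD bs d2 [] ++ [(ox, oy)])) bs) bs0
      = (pvScan r).foldl (fun bs t =>
          PySem.List.pySetD bs t.1 (PySem.List.pyGetD bs t.1 [] ++ [(t.2.1, t.2.2)])) bs0 := by
    intro bs0
    unfold pvScan
    rw [List.foldl_flatMap]
    apply PySem.List.foldl_congr_mem
    intro acc oy _
    rw [List.foldl_flatMap]
    apply PySem.List.foldl_congr_mem
    intro acc' ox _
    by_cases h : ox = 0 ∧ oy = 0 <;> simp [h]
  rw [hstep]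
  exact pvBuckets_fold _ _ (fun t ht => by
    have := pvScan_key_bound r t ht
    constructor
    · exact this.1
    · have : t.1 < 2*r*r+1 := this.2
      omega)

theorem make_bleed_offsets_py_spec' (radius : Int) :
    make_bleed_offsets_py radius = make_bleed_offsets_py_alt radius := by
  unfold make_bleed_offsets_py make_bleed_offsets_py_alt
  dsimp only
  set r : Int := max 1 radius with hrdef
  have hr : 1 ≤ r := le_max_left 1 radius
  set N : Nat := (2*r*r+1).toNat with hNdef
  have hNval : ((N:Int)) = 2*r*r+1 := by
    have : (0:Int) ≤ 2*r*r+1 := by positivity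
    simp [hNdef, Int.toNat_of_nonneg this]
  -- A side
  rw [pvOffs_eq_scan r]
  have hks : (pvKs N).Pairwise (· < ·) := by
    have := List.pairwise_lt_range (n := N)
    exact List.Pairwise.map _ (by intro a b h; simp; omega) this
  have hl : ∀ a ∈ pvScan r, a.1 ∈ pvKs N := by
    intro a ha
    have hb := pvScan_key_bound r a ha
    simp only [pvKs, List.mem_map, List.mem_range]
    refine ⟨a.1.toNat, by omega, by simp; omega⟩
  rw [pvSorted_eq_buckets (fun (t : Int × Int × Int) => t.1) (pvKs N) (pvScan r) hks hl]
  -- B side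
  rw [pvBucketsFill_eq r hr, PySem.List.foldl_append_eq_flatMap]
  simp only [List.nil_append]
  -- both are the flatMap over the bucket indices
  unfold pvBuckets pvKs
  rw [List.flatMap_map, List.map_flatMap]
  simp only [List.flatMap_map, ← hNdef]

-- ===== VERDICT (by name: the statement is the Claim_ definition above) =====
theorem make_bleed_offsets_py_spec : Claim_equal_make_bleed_offsets_py := by
  intro radius _
  unfold Spec_make_bleed_offsets_py
  exact make_bleed_offsets_py_spec' radius
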